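-- pv_equiv track=rewrite | github.com/janetzki/fact_extraction | wikipedia dump connector/dump_extractor.py | strip_outer_brackets
-- ===== SOURCE A (Python) =====
-- def strip_outer_brackets(text):
--     # http://stackoverflow.com/questions/14596884/remove-text-between-and-in-python
--     stripped = ''
--     skip = 0
--     for i in text:
--         if i == '{':
--             skip += 1
--         elif i == '}' and skip > 0:
--             skip -= 1
--         elif skip == 0:
--             stripped += i
--     return stripped
-- ===== SOURCE B (Python) =====
-- def strip_outer_brackets(text):
--     # Recursive descent: skip a brace group by recursion instead of a depth counter.
--     n = len(text)
--
--     def skip_group(i):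
--         # i: index just after an opening '{'; return index just after the
--         # matching '}' (or n if the group is never closed).
--         while i < n:
--             c = text[i]
--             if c == '{':
--                 i = skip_group(i + 1)
--             elif c == '}':
--                 return i + 1
--             else:
--                 i += 1
--         return i
--
--     out = []
--     i = 0
--     while i < n:
--         c = text[i]
--         if c == '{':
--             i = skip_group(i + 1)
--         else:
--             out.append(c)
--             i += 1
--     return ''.join(out)
-- ===== Notes on version B (the rewrite author's own statement) =====
-- stated objective: alternative
-- what changed: Replaces A's single pass with a numeric nesting counter by a recursive-descent scan whose recursive skip_group consumes one whole brace group, collecting kept characters in a list joined at the end.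
import Mathlib
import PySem

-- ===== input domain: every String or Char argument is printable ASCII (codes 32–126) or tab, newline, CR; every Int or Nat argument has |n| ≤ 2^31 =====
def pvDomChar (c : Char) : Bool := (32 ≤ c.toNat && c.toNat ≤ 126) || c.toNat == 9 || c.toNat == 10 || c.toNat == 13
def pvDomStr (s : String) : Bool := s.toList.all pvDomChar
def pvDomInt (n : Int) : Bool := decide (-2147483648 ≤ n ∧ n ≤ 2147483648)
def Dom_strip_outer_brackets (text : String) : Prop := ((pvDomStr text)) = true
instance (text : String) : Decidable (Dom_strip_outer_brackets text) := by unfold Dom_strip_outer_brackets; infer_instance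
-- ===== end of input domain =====

-- B is an alternative, structurally different implementation: recursive descent
-- (a recursive `skip_group` that consumes one brace group) instead of A's
-- single pass with a numeric nesting counter.

-- ===== PORT A =====
-- A's loop: state (stripped, skip), one step per character, branches in A's order.
def stripAStep (st : List Char × Int) (i : Char) : List Char × Int :=
  if i = '{' then (st.1, st.2 + 1)
  else if i = '}' ∧ st.2 > 0 then (st.1, st.2 - 1)
  else if st.2 = 0 then (st.1 ++ [i], st.2)
  else st

def strip_outer_brackets (text : String) : String :=
  String.ofList (text.toList.foldl stripAStep ([], 0)).1

-- ===== PORT B =====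
-- `skip_group`: chars just after an opening '{' ↦ chars just after the matching '}'.
-- The subtype bound is only the termination measure for the nested recursive call.
def skipGroup : (l : List Char) → { r : List Char // r.length ≤ l.length }
  | [] => ⟨[], Nat.le_refl _⟩
  | c :: rest =>
    if c = '{' then
      let r1 := skipGroup rest
      let r2 := skipGroup r1.1
      ⟨r2.1, Nat.le_trans (Nat.le_trans r2.2 r1.2) (Nat.le_succ _)⟩
    else if c = '}' then ⟨rest, Nat.le_succ _⟩
    else
      let r := skipGroup rest
      ⟨r.1, Nat.le_trans r.2 (Nat.le_succ _)⟩
termination_by l => l.length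
decreasing_by
  · simp
  · exact Nat.lt_succ_of_le r1.2
  · simp

-- main loop of B: keep chars, delegate each '{'-group to skipGroup
def stripGo : (l : List Char) → List Char
  | [] => []
  | c :: rest =>
    if c = '{' then stripGo (skipGroup rest).1
    else c :: stripGo rest
termination_by l => l.length
decreasing_by
  · exact Nat.lt_succ_of_le (skipGroup rest).2
  · simp

def strip_outer_brackets_alt (text : String) : String :=
  String.ofList (stripGo text.toList)

-- ===== PRECONDITION & SPEC =====
def Spec_strip_outer_brackets (text : String) (out : String) : Prop := out = strip_outer_brackets_alt text
instance (text : String) (out : String) : Decidable (Spec_strip_outer_brackets text out) := by unfold Spec_strip_outer_brackets; infer_instance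

-- ===== CLAIM (what is proved, stated in full; the proofs are below) =====
def Claim_equal_strip_outer_brackets : Prop := ∀ (text : String), Dom_strip_outer_brackets text → Spec_strip_outer_brackets text (strip_outer_brackets text)

-- ===== LEMMAS AND PROOFS =====

-- A's loop rewritten as structural recursion on the remaining input (kept chars only).
def aLoop : List Char → Int → List Char
  | [], _ => []
  | i :: rest, skip =>
    if i = '{' then aLoop rest (skip + 1)
    else if i = '}' ∧ skip > 0 then aLoop rest (skip - 1)
    else if skip = 0 then i :: aLoop rest skip
    else aLoop rest skip

theorem foldl_stripAStep (l : List Char) (acc : List Char) (skip : Int) :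
    (l.foldl stripAStep (acc, skip)).1 = acc ++ aLoop l skip := by
  induction l generalizing acc skip with
  | nil => simp [aLoop]
  | cons i rest ih =>
    simp only [List.foldl_cons, stripAStep, aLoop]
    split_ifs with h1 h2 h3 <;> simp [ih]

-- while A's counter is positive, A just discards the chars skipGroup discards
theorem aLoop_pos_aux (n : Nat) : ∀ (l : List Char), l.length ≤ n →
    ∀ (k : Int), 0 ≤ k → aLoop l (k + 1) = aLoop (skipGroup l).1 k := by
  induction n with
  | zero =>
    intro l hl k hk
    match l with
    | [] => simp [skipGroup, aLoop]
  | succ n ih =>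
  intro l hl k hk
  match l with
  | [] => simp [skipGroup, aLoop]
  | c :: rest =>
    by_cases hb : c = '{'
    · subst hb
      rw [aLoop, if_pos rfl, skipGroup]
      rw [if_pos rfl]
      have h1 : aLoop rest (k + 1 + 1) = aLoop (skipGroup rest).1 (k + 1) := by
        exact ih rest (by simpa using hl) (k + 1) (by omega)
      rw [h1]
      exact ih (skipGroup rest).1
        (by have := (skipGroup rest).2; simp at hl; omega) k hk
    · by_cases hc : c = '}'
      · subst hc
        rw [aLoop, if_neg hb, if_pos ⟨rfl, by omega⟩, skipGroup]
        rw [if_neg hb, if_pos rfl]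
        congr 1
        omega
      · rw [aLoop, if_neg hb, if_neg (by simp [hc]), if_neg (by omega), skipGroup]
        simp only [if_neg hb, if_neg hc]
        exact ih rest (by simpa using hl) k hk

theorem aLoop_pos (l : List Char) (k : Int) (hk : 0 ≤ k) :
    aLoop l (k + 1) = aLoop (skipGroup l).1 k :=
  aLoop_pos_aux l.length l (Nat.le_refl _) k hk

theorem aLoop_zero (l : List Char) : aLoop l 0 = stripGo l := by
  induction hn : l.length using Nat.strong_induction_on generalizing l with
  | _ n ih =>
  match l with
  | [] => simp [aLoop, stripGo]
  | c :: rest =>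
    by_cases hb : c = '{'
    · subst hb
      rw [aLoop, if_pos rfl, stripGo, if_pos rfl]
      have h1 : aLoop rest (0 + 1) = aLoop (skipGroup rest).1 0 := aLoop_pos rest 0 le_rfl
      rw [h1]
      exact ih (skipGroup rest).1.length
        (by have := (skipGroup rest).2; simp [← hn]; omega) _ rfl
    · rw [aLoop, if_neg hb, if_neg (by simp), if_pos rfl, stripGo, if_neg hb]
      rw [ih rest.length (by simp [← hn]) rest rfl]

-- ===== VERDICT (by name: the statement is the Claim_ definition above) =====
theorem strip_outer_brackets_spec : Claim_equal_strip_outer_brackets := by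
  intro text _
  unfold Spec_strip_outer_brackets strip_outer_brackets strip_outer_brackets_alt
  rw [foldl_stripAStep, List.nil_append, aLoop_zero]
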